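-- pv_equiv track=rewrite | github.com/Sev-Andr/AI_lab | 4/2.1/lr4/lab2/module1.py | swap_negatives
-- ===== SOURCE A (Python) =====
-- def swap_negatives(arr):
--     fl = False
--     first_min_ind = 0
--     for index in range(len(arr)):
--         if arr[index] < 0 and fl == False:
--             # finding the first minimum
--             first_min_ind = index
--             fl = True
--         elif arr[index] < 0 and fl == True:
--             # swap
--             arr[index], arr[first_min_ind] = arr[first_min_ind], arr[index]
--             # normal
--             fl = False
--     return arr
-- ===== SOURCE B (Python) =====
-- def swap_negatives(arr):
--     neg = [i for i in range(len(arr)) if arr[i] < 0]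
--     t = 0
--     while t + 1 < len(neg):
--         i, j = neg[t], neg[t + 1]
--         arr[i], arr[j] = arr[j], arr[i]
--         t += 2
--     return arr
-- ===== Notes on version B (the rewrite author's own statement) =====
-- stated objective: simpler
-- what changed: Replaced A's one-pass scan with a pending-flag/first-index state machine by a two-phase decomposition: collect all negative positions in one comprehension, then swap them pairwise.
import Mathlib
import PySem

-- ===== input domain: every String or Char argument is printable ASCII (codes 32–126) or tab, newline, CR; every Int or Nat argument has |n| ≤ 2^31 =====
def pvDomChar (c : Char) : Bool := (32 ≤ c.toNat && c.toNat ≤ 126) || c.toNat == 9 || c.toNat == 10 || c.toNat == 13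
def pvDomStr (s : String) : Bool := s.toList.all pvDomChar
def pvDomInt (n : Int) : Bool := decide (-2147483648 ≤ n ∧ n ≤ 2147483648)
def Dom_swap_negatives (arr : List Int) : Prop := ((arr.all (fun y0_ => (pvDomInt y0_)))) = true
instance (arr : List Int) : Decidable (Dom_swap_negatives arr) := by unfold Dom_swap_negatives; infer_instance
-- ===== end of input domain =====

-- B replaces A's one-pass flag/state scan by collect-negative-indices-then-swap-pairs (simpler
-- decomposition, same O(n)); both A and B mutate the Python list in place, the return value is the
-- same mutated object in both, and the equivalence proved here is about the returned contents.

-- ===== PORT A =====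
-- one loop step of A; indices come from range(len(arr)) and swaps keep the length, so every
-- arr[index] / arr[first_min_ind] access is in range and getD is exact here
def swapNegStepA (st : List Int × Bool × Nat) (index : Nat) : List Int × Bool × Nat :=
  let a := st.1; let fl := st.2.1; let fmi := st.2.2
  if a.getD index 0 < 0 ∧ fl = false then
    (a, true, index)
  else if a.getD index 0 < 0 ∧ fl = true then
    ((a.set index (a.getD fmi 0)).set fmi (a.getD index 0), false, fmi)
  else
    st

def swap_negatives (arr : List Int) : List Int :=
  (((List.range arr.length).foldl swapNegStepA (arr, false, 0))).1

-- ===== PORT B =====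
-- the while-loop of B: swap neg[t], neg[t+1], advance t by 2; t, t+1 < len neg so getD is exact
def swapNegLoop (neg : List Nat) (a : List Int) (t : Nat) : List Int :=
  if t + 1 < neg.length then
    let i := neg.getD t 0
    let j := neg.getD (t + 1) 0
    swapNegLoop neg ((a.set i (a.getD j 0)).set j (a.getD i 0)) (t + 2)
  else a
  termination_by neg.length - t

def swap_negatives_alt (arr : List Int) : List Int :=
  -- neg = [i for i in range(len(arr)) if arr[i] < 0]; indices are in range, getD exact
  let neg := (List.range arr.length).filter (fun i => arr.getD i 0 < 0)
  swapNegLoop neg arr 0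

-- ===== PRECONDITION & SPEC =====
def Spec_swap_negatives (arr : List Int) (out : List Int) : Prop := out = swap_negatives_alt arr
instance (arr : List Int) (out : List Int) : Decidable (Spec_swap_negatives arr out) := by unfold Spec_swap_negatives; infer_instance

-- ===== CLAIM (what is proved, stated in full; the proofs are below) =====
def Claim_equal_swap_negatives : Prop := ∀ (arr : List Int), Dom_swap_negatives arr → Spec_swap_negatives arr (swap_negatives arr)

-- ===== LEMMAS AND PROOFS =====

-- proof-side view of B's loop: consume the index list two at a time
def swapNegPairs (a : List Int) : List Nat → List Int
  | i :: j :: neg => swapNegPairs ((a.set i (a.getD j 0)).set j (a.getD i 0)) neg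
  | _ => a

-- B's indexed while-loop is the two-at-a-time recursion on the remaining suffix of neg
lemma swapNegLoop_eq (neg : List Nat) (a : List Int) (t : Nat) :
    swapNegLoop neg a t = swapNegPairs a (neg.drop t) := by
  induction a, t using swapNegLoop.induct neg with
  | case1 a t h i j ih =>
    rw [swapNegLoop, if_pos h]
    rw [ih]
    have h1 : t < neg.length := by omega
    rw [List.drop_eq_getElem_cons h1, List.drop_eq_getElem_cons h]
    simp only [i, j, List.getD_eq_getElem _ _ h1, List.getD_eq_getElem _ _ h,
      List.getD_eq_getElem?_getD]
    rfl
  | case2 a t h =>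
    rw [swapNegLoop, if_neg h]
    have : neg.drop t = [] ∨ ∃ x, neg.drop t = [x] := by
      have hlen : (neg.drop t).length ≤ 1 := by simp [List.length_drop]; omega
      match hd : neg.drop t with
      | [] => exact Or.inl rfl
      | [x] => exact Or.inr ⟨x, rfl⟩
      | x :: y :: r => rw [hd] at hlen; simp at hlen
    rcases this with h0 | ⟨x, h1⟩
    · rw [h0]; rfl
    · rw [h1]; rfl

-- setting positions below k does not change the filter of indices ≥ k
lemma filter_set_lt (a : List Int) (v : Int) (p k m : Nat) (hp : p < k) :
    (List.range' k m).filter (fun i => (a.set p v).getD i 0 < 0)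
      = (List.range' k m).filter (fun i => a.getD i 0 < 0) := by
  apply List.filter_congr
  intro i hi
  have hki : k ≤ i := (List.mem_range'_1.mp hi).1
  have hpi : p ≠ i := by omega
  simp [List.getD, List.getElem?_set_ne hpi]

-- the core invariant: running A's loop over indices [k, k+m) from state (a, fl, p), with p < k when
-- the flag is set, yields B's pair-swapping applied to the pending index (if any) followed by the
-- negative indices of a in [k, k+m)
lemma swapNeg_loop_eq (m : Nat) : ∀ (k : Nat) (a : List Int) (fl : Bool) (p : Nat),
    (fl = true → p < k) →
    ((List.range' k m).foldl swapNegStepA (a, fl, p)).1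
      = swapNegPairs a ((if fl then [p] else []) ++
          (List.range' k m).filter (fun i => a.getD i 0 < 0)) := by
  induction m with
  | zero =>
    intro k a fl p _
    cases fl <;> simp [swapNegPairs]
  | succ m ih =>
    intro k a fl p hp
    rw [List.range'_succ]
    by_cases hneg : (a[k]?.getD 0 : Int) < 0
    · cases fl with
      | false =>
        -- first negative: record index k, flag set
        have hstep : swapNegStepA (a, false, p) k = (a, true, k) := by
          simp [swapNegStepA, List.getD_eq_getElem?_getD, hneg]
        simp only [List.foldl_cons, hstep]
        rw [ih (k+1) a true k (fun _ => Nat.lt_succ_self k)]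
        simp [List.getD_eq_getElem?_getD, hneg]
      | true =>
        -- second negative: swap positions p and k, flag cleared
        have hpk : p < k := hp rfl
        have hstep : swapNegStepA (a, true, p) k
            = ((a.set k (a.getD p 0)).set p (a.getD k 0), false, p) := by
          simp [swapNegStepA, List.getD_eq_getElem?_getD, hneg]
        simp only [List.foldl_cons, hstep]
        rw [ih (k+1) _ false p (by simp)]
        have hne : k ≠ p := by omega
        -- the two write orders coincide, and writes at p, k < k+1 do not change later reads
        rw [List.set_comm _ _ hne]
        have hfilters :
            (List.range' (k+1) m).filter
                (fun i => ((a.set p (a.getD k 0)).set k (a.getD p 0)).getD i 0 < 0)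
              = (List.range' (k+1) m).filter (fun i => a.getD i 0 < 0) := by
          rw [filter_set_lt _ _ _ _ _ (by omega)]
          rw [filter_set_lt _ _ _ _ _ (by omega)]
        rw [hfilters]
        simp [List.getD_eq_getElem?_getD, hneg, swapNegPairs]
    · -- non-negative entry: state unchanged
      have hstep : swapNegStepA (a, fl, p) k = (a, fl, p) := by
        simp [swapNegStepA, List.getD_eq_getElem?_getD, hneg]
      simp only [List.foldl_cons, hstep]
      rw [ih (k+1) a fl p (fun h => Nat.lt_succ_of_lt (hp h))]
      simp [List.getD_eq_getElem?_getD, hneg]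

-- ===== VERDICT (by name: the statement is the Claim_ definition above) =====
theorem swap_negatives_spec : Claim_equal_swap_negatives := by
  intro arr _
  unfold Spec_swap_negatives swap_negatives swap_negatives_alt
  rw [List.range_eq_range']
  rw [swapNeg_loop_eq arr.length 0 arr false 0 (by simp)]
  rw [swapNegLoop_eq]
  simp
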